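-- pv_equiv track=rewrite | github.com/StayErk/EserciziPA | Esercizio1/esercizio1.py | copyUpTo
-- ===== SOURCE A (Python) =====
-- def copyUpTo(L: 'lista',
--              x: 'elemento da cercare') -> 'copia della lista che contiene gli elementi fino a x':
--     if L == []:
--         return []
--
--     if L[0] == x:
--         return []
--
--     if L[0] != x:
--         # accoda il risultato della chiamata ricorsiva copyUpTo
--         # al primo elemento della lista L
--         return L[:1]+copyUpTo(L[1:], x)
-- ===== SOURCE B (Python) =====
-- def copyUpTo(L: 'lista',
--              x: 'elemento da cercare') -> 'copia della lista che contiene gli elementi fino a x':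
--     result = []
--     for e in L:
--         if e == x:
--             break
--         result.append(e)
--     return result
-- ===== Notes on version B (the rewrite author's own statement) =====
-- stated objective: simpler
-- what changed: Replaced the slice-and-concatenate recursion with a single iterative pass that appends elements to an accumulator and breaks at the first occurrence of x.
import Mathlib
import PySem

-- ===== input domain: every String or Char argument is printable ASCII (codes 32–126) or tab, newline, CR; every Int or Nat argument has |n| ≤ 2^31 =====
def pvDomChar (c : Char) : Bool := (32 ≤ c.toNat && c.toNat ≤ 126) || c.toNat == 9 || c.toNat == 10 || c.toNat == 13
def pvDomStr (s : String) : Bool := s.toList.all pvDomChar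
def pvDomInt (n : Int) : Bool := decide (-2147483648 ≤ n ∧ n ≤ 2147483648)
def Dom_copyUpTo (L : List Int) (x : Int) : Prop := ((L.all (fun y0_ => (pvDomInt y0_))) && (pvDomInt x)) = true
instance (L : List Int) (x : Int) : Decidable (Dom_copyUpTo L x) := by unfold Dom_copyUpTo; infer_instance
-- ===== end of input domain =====

-- B replaces A's slice-and-concatenate recursion with one iterative pass that breaks at the first x (simpler).


-- ===== PORT A =====
-- literal transliteration of A's recursion: L[:1] and L[1:] via PySem slices
def copyUpTo (L : List Int) (x : Int) : List Int :=
  if L = [] then []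
  else if PySem.List.pyGetD L 0 0 = x then []
  else PySem.List.slice L none (some 1) ++ copyUpTo (PySem.List.slice L (some 1) none) x
termination_by L.length
decreasing_by
  simp [PySem.List.slice]
  cases L with
  | nil => simp_all
  | cons a t => simp

-- ===== PORT B =====
-- B's loop: accumulator grown by append, loop stops at the first e = x
def copyUpToLoop (acc : List Int) (rest : List Int) (x : Int) : List Int :=
  match rest with
  | [] => acc
  | e :: t => if e = x then acc else copyUpToLoop (acc ++ [e]) t x

def copyUpTo_alt (L : List Int) (x : Int) : List Int := copyUpToLoop [] L x

-- ===== PRECONDITION & SPEC =====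
def Spec_copyUpTo (L : List Int) (x : Int) (out : List Int) : Prop := out = copyUpTo_alt L x
instance (L : List Int) (x : Int) (out : List Int) : Decidable (Spec_copyUpTo L x out) := by unfold Spec_copyUpTo; infer_instance

-- ===== CLAIM (what is proved, stated in full; the proofs are below) =====
def Claim_equal_copyUpTo : Prop := ∀ (L : List Int) (x : Int), Dom_copyUpTo L x → Spec_copyUpTo L x (copyUpTo L x)

-- ===== LEMMAS AND PROOFS =====
theorem copyUpToLoop_acc (acc : List Int) (L : List Int) (x : Int) :
    copyUpToLoop acc L x = acc ++ copyUpToLoop [] L x := by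
  induction L generalizing acc with
  | nil => simp [copyUpToLoop]
  | cons e t ih =>
    by_cases h : e = x
    · simp [copyUpToLoop, h]
    · simp only [copyUpToLoop, if_neg h, List.nil_append]
      rw [ih (acc ++ [e]), ih [e]]
      simp

theorem copyUpTo_eq_alt (L : List Int) (x : Int) : copyUpTo L x = copyUpTo_alt L x := by
  induction L with
  | nil => rw [copyUpTo]; simp [copyUpTo_alt, copyUpToLoop]
  | cons a t ih =>
    rw [copyUpTo]
    by_cases h : a = x
    · simp [copyUpTo_alt, copyUpToLoop, PySem.List.pyGetD, PySem.List.pyGet?, PySem.List.pyIdx?, h]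
    · rw [if_neg (by simp), if_neg (by simp [PySem.List.pyGetD, PySem.List.pyGet?, PySem.List.pyIdx?, h])]
      simp only [copyUpTo_alt, copyUpToLoop, if_neg h, List.nil_append]
      rw [copyUpToLoop_acc [a], PySem.List.slice_from_one,
        show PySem.List.slice (a :: t) none (some 1) = (a :: t).take 1 from
          PySem.List.slice_to_natCast (a :: t) 1]
      simpa using ih

-- ===== VERDICT (by name: the statement is the Claim_ definition above) =====
theorem copyUpTo_spec : Claim_equal_copyUpTo := by
  intro L x _
  unfold Spec_copyUpTo
  exact copyUpTo_eq_alt L x
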